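-- pv_equiv track=rewrite | github.com/daejinseok/algo_with_python | 10. 그래프 이론/3. 도시 분활 계획/solution.py | solution
-- ===== SOURCE A (Python) =====
-- def find_root(group, a):
--     if group[a] == a:
--         return a
--
--     group[a] = find_root(group, group[a])
--     return group[a]
--
-- def union(group, root_a, root_b):
--
--     if root_a < root_b:
--         group[root_b] = root_a
--     else:
--         group[root_a] = root_b
--
-- def solution(n, edge):
--
--     group = list(range(n+1))
--     edge.sort(key=lambda x: x[0])
--
--     sum = 0
--     max = 0
--     count = 0
--     n_1 = n - 1
--
--     for cost, a, b in edge: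
--
--         root_a = find_root(group, a)
--         root_b = find_root(group, b)
--
--         if root_a == root_b:
--             continue
--
--         union(group, root_a, root_b)
--         sum += cost
--         max = cost
--         count += 1
--
--         if count == n_1:
--             break
--
--     return sum - max
-- ===== SOURCE B (Python) =====
-- def solution(n, edge):
--     # Kruskal by component labels: comp[v] is the smallest vertex of v's component.
--     # Reads edge without sorting it in place (A sorts its argument; return value only is matched).
--     comp = list(range(n + 1))
--     total = 0
--     last = 0
--     picked = 0
--     for cost, a, b in sorted(edge, key=lambda e: e[0]):
--         ra, rb = comp[a], comp[b]
--         if ra == rb: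
--             continue
--         lo, hi = (ra, rb) if ra < rb else (rb, ra)
--         comp = [lo if c == hi else c for c in comp]
--         total += cost
--         last = cost
--         picked += 1
--         if picked == n - 1:
--             break
--     return total - last
-- ===== Notes on version B (the rewrite author's own statement) =====
-- stated objective: simpler
-- what changed: A's recursive path-compressing union-find (find_root/union on a parent array, with an in-place sort of the edge argument) is replaced by a flat component-label list: each vertex carries the smallest vertex of its component, a lookup is one read and a merge is one relabelling pass, with no recursion and no mutation of the argument.
-- outside the precondition, e.g. on solution(2, [(1, 0, 1), (2, 1, 2), (3, 99, 0)]): A returns 0, B returns 0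
import Mathlib
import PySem

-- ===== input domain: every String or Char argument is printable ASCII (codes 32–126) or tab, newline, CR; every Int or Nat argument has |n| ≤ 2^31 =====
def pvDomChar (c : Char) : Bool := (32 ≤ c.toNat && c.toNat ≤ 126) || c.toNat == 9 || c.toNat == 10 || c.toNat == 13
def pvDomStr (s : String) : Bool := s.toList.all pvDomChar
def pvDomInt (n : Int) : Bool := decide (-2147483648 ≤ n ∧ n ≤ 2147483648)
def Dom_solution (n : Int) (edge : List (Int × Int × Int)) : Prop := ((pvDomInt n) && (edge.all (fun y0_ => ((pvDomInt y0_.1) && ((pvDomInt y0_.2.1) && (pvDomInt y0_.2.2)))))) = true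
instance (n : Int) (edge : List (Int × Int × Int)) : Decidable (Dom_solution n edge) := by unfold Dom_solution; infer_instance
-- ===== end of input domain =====

-- B replaces A's recursive path-compressing union-find by a flat component-label list
-- (label = smallest vertex of the component, merged by one relabelling pass); B also reads
-- `edge` without sorting it in place (A mutates its argument; the return value is what is matched).

-- ===== PORT A =====
-- find_root with path compression; the fuel argument only totalizes the recursion
-- (group.length + 1 steps always suffice under Pre_) and mirrors no Python construct.
def pvFindRoot (fuel : Nat) (group : List Int) (a : Int) : List Int × Int :=
  match fuel with
  | 0 => (group, a)
  | f + 1 =>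
    let ga := (PySem.List.pyGet? group a).getD a
    if ga = a then (group, a)
    else
      let rec1 := pvFindRoot f group ga
      let g2 := PySem.List.pySetD rec1.1 a rec1.2
      (g2, (PySem.List.pyGet? g2 a).getD a)

def pvUnion (group : List Int) (rootA rootB : Int) : List Int :=
  if rootA < rootB then PySem.List.pySetD group rootB rootA
  else PySem.List.pySetD group rootA rootB

def pvKruskalLoop (n1 : Int) (group : List Int) (s m cnt : Int) :
    List (Int × Int × Int) → Int
  | [] => s - m
  | (cost, a, b) :: rest =>
    let r1 := pvFindRoot (group.length + 1) group a
    let r2 := pvFindRoot (r1.1.length + 1) r1.1 b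
    if r1.2 = r2.2 then pvKruskalLoop n1 r2.1 s m cnt rest
    else
      let g3 := pvUnion r2.1 r1.2 r2.2
      if cnt + 1 = n1 then (s + cost) - cost
      else pvKruskalLoop n1 g3 (s + cost) cost (cnt + 1) rest

def solution (n : Int) (edge : List (Int × Int × Int)) : Int :=
  pvKruskalLoop (n - 1) (PySem.List.pyRange 0 (n + 1) 1) 0 0 0
    (PySem.List.sorted edge (fun x => x.1))

-- ===== PORT B =====
def pvLabelLoop (n : Int) (comp : List Int) (total last picked : Int) :
    List (Int × Int × Int) → Int
  | [] => total - last
  | (cost, a, b) :: rest =>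
    let ra := (PySem.List.pyGet? comp a).getD a
    let rb := (PySem.List.pyGet? comp b).getD b
    if ra = rb then pvLabelLoop n comp total last picked rest
    else
      let lo := if ra < rb then ra else rb
      let hi := if ra < rb then rb else ra
      let comp' := comp.map (fun c => if c = hi then lo else c)
      if picked + 1 = n - 1 then (total + cost) - cost
      else pvLabelLoop n comp' (total + cost) cost (picked + 1) rest

def solution_alt (n : Int) (edge : List (Int × Int × Int)) : Int :=
  pvLabelLoop n (PySem.List.pyRange 0 (n + 1) 1) 0 0 0
    (PySem.List.sorted edge (fun e => e.1))

-- ===== PRECONDITION & SPEC =====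
-- Pre_ excludes the inputs with an edge endpoint outside Python's valid index range
-- (negative indices included) for the list of n+1 vertices: on those A raises IndexError,
-- except when the bad edge is reached only after Kruskal's early break (then both programs
-- return the same value); the bound is kept as one simple closed-form condition per edge.
def Pre_solution (n : Int) (edge : List (Int × Int × Int)) : Prop :=
  ∀ e ∈ edge, -(n + 1) ≤ e.2.1 ∧ e.2.1 ≤ n ∧ -(n + 1) ≤ e.2.2 ∧ e.2.2 ≤ n
instance (n : Int) (edge : List (Int × Int × Int)) : Decidable (Pre_solution n edge) := by
  unfold Pre_solution; infer_instance

def pvWitness_solution : Int × (List (Int × Int × Int)) :=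
  (3, [(5, 1, 2), (3, 0, 1), (4, -1, 0), (2, 3, 3)])

def Spec_solution (n : Int) (edge : List (Int × Int × Int)) (out : Int) : Prop := out = solution_alt n edge
instance (n : Int) (edge : List (Int × Int × Int)) (out : Int) : Decidable (Spec_solution n edge out) := by unfold Spec_solution; infer_instance

-- ===== CLAIM (what is proved, stated in full; the proofs are below) =====
def Claim_equal_solution : Prop := ∀ (n : Int) (edge : List (Int × Int × Int)), Dom_solution n edge → Pre_solution n edge → Spec_solution n edge (solution n edge)

-- ===== LEMMAS AND PROOFS =====

def pvPInv (g : List Int) : Prop :=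
  ∀ i : Nat, i < g.length → 0 ≤ g.getD i 0 ∧ g.getD i 0 ≤ (i : Int)
def pvRootF (g : List Int) : Nat → Nat → Int
  | 0, i => (i : Int)
  | f + 1, i =>
    let p := g.getD i 0
    if p = (i : Int) then (i : Int) else pvRootF g f p.toNat
def pvRt (g : List Int) (i : Nat) : Int := pvRootF g (i + 1) i

theorem pvRootF_stable (g : List Int) (hP : pvPInv g) :
    ∀ i : Nat, i < g.length → ∀ f : Nat, i + 1 ≤ f → pvRootF g f i = pvRt g i := by
  intro i
  induction i using Nat.strong_induction_on with
  | _ i IH =>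
    intro hi f hf
    obtain ⟨f', rfl⟩ : ∃ f', f = f' + 1 := ⟨f - 1, by omega⟩
    show pvRootF g (f' + 1) i = pvRootF g (i + 1) i
    simp only [pvRootF]
    by_cases hp : g.getD i 0 = (i : Int)
    · rw [if_pos hp, if_pos hp]
    · rw [if_neg hp, if_neg hp]
      obtain ⟨h0, h1⟩ := hP i hi
      have hlt : (g.getD i 0).toNat < i := by omega
      have hlen : (g.getD i 0).toNat < g.length := by omega
      rw [IH _ hlt hlen f' (by omega), IH _ hlt hlen i (by omega)]

theorem pvRt_unfold (g : List Int) (hP : pvPInv g) (i : Nat) (hi : i < g.length) :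
    pvRt g i = if g.getD i 0 = (i : Int) then (i : Int) else pvRt g (g.getD i 0).toNat := by
  show pvRootF g (i + 1) i = _
  simp only [pvRootF]
  by_cases hp : g.getD i 0 = (i : Int)
  · rw [if_pos hp, if_pos hp]
  · rw [if_neg hp, if_neg hp]
    obtain ⟨h0, h1⟩ := hP i hi
    have hlt : (g.getD i 0).toNat < i := by omega
    exact pvRootF_stable g hP _ (by omega) i (by omega)

theorem pvRt_bounds (g : List Int) (hP : pvPInv g) (i : Nat) (hi : i < g.length) :
    0 ≤ pvRt g i ∧ pvRt g i ≤ (i : Int) := by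
  induction i using Nat.strong_induction_on with
  | _ i IH =>
    rw [pvRt_unfold g hP i hi]
    by_cases hp : g.getD i 0 = (i : Int)
    · rw [if_pos hp]; omega
    · rw [if_neg hp]
      obtain ⟨h0, h1⟩ := hP i hi
      have hlt : (g.getD i 0).toNat < i := by omega
      obtain ⟨a, b⟩ := IH _ hlt (by omega)
      refine ⟨a, by omega⟩

theorem pvRt_isRoot (g : List Int) (hP : pvPInv g) (i : Nat) (hi : i < g.length) :
    g.getD (pvRt g i).toNat 0 = pvRt g i := by
  induction i using Nat.strong_induction_on with
  | _ i IH =>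
    rw [pvRt_unfold g hP i hi]
    by_cases hp : g.getD i 0 = (i : Int)
    · rw [if_pos hp]; simpa using hp
    · rw [if_neg hp]
      obtain ⟨h0, h1⟩ := hP i hi
      have hlt : (g.getD i 0).toNat < i := by omega
      exact IH _ hlt (by omega)

theorem pvRt_of_root (g : List Int) (i : Nat) (h : g.getD i 0 = (i : Int)) :
    pvRt g i = (i : Int) := by
  show pvRootF g (i + 1) i = _
  simp only [pvRootF, h, if_true]

theorem pv_getD_set (xs : List Int) (j : Nat) (v : Int) (i : Nat) (hj : j < xs.length) :
    (xs.set j v).getD i 0 = if i = j then v else xs.getD i 0 := by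
  rw [List.getD_eq_getElem?_getD, List.getD_eq_getElem?_getD, List.getElem?_set]
  by_cases h1 : i = j
  · subst h1; simp [hj]
  · simp [if_neg (by omega : ¬ j = i), h1]

theorem pvPInv_set (g : List Int) (j : Nat) (v : Int) (hv0 : 0 ≤ v) (hvj : v ≤ (j : Int))
    (hP : pvPInv g) : pvPInv (g.set j v) := by
  intro i hi
  rw [List.length_set] at hi
  by_cases hj : j < g.length
  · rw [pv_getD_set g j v i hj]
    by_cases h : i = j
    · subst h; rw [if_pos rfl]; exact ⟨hv0, hvj⟩
    · rw [if_neg h]; exact hP i hi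
  · rw [List.set_eq_of_length_le (by omega)]
    exact hP i hi

theorem pvRt_set_compress (g : List Int) (hP : pvPInv g) (j : Nat) (hj : j < g.length) :
    ∀ i : Nat, i < g.length → pvRt (g.set j (pvRt g j)) i = pvRt g i := by
  have hb := pvRt_bounds g hP j hj
  have hP' : pvPInv (g.set j (pvRt g j)) := pvPInv_set g j _ hb.1 hb.2 hP
  have hlen : (g.set j (pvRt g j)).length = g.length := by simp
  intro i
  induction i using Nat.strong_induction_on with
  | _ i IH =>
    intro hi
    rw [pvRt_unfold _ hP' i (by omega), pv_getD_set g j _ i hj]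
    by_cases hij : i = j
    · subst hij
      rw [if_pos rfl]
      by_cases hroot : pvRt g i = (i : Int)
      · rw [if_pos hroot, hroot]
      · rw [if_neg hroot]
        have hrle : (pvRt g i).toNat < i := by omega
        rw [IH _ hrle (by omega)]
        have hroot2 := pvRt_isRoot g hP i hi
        rw [pvRt_of_root g _ (by rw [hroot2]; omega)]
        omega
    · rw [if_neg hij]
      by_cases hp : g.getD i 0 = (i : Int)
      · rw [if_pos hp, pvRt_of_root g i hp]
      · rw [if_neg hp]
        obtain ⟨h0, h1⟩ := hP i hi
        have hlt : (g.getD i 0).toNat < i := by omega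
        rw [IH _ hlt (by omega)]
        rw [pvRt_unfold g hP i hi, if_neg hp]

theorem pvRt_set_union (g : List Int) (hP : pvPInv g) (j : Nat) (hj : j < g.length)
    (hjr : g.getD j 0 = (j : Int)) (v : Int) (hv0 : 0 ≤ v) (hvlt : v < (j : Int))
    (hvr : g.getD v.toNat 0 = v) :
    ∀ i : Nat, i < g.length →
      pvRt (g.set j v) i = if pvRt g i = (j : Int) then v else pvRt g i := by
  have hP' : pvPInv (g.set j v) := pvPInv_set g j v hv0 (by omega) hP
  intro i
  induction i using Nat.strong_induction_on with
  | _ i IH =>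
    intro hi
    rw [pvRt_unfold _ hP' i (by simpa using hi), pv_getD_set g j v i hj]
    by_cases hij : i = j
    · subst hij
      have hri : pvRt g i = (i : Int) := pvRt_of_root g i hjr
      rw [if_pos rfl, if_neg (by omega : ¬ v = (i : Int)), if_pos hri]
      have hvlt' : v.toNat < i := by omega
      rw [IH _ hvlt' (by omega)]
      have hrv : pvRt g v.toNat = v := by
        have := pvRt_of_root g v.toNat (by rw [hvr]; omega)
        omega
      rw [hrv, if_neg (by omega : ¬ v = (i : Int))]
    · rw [if_neg hij]
      by_cases hp : g.getD i 0 = (i : Int)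
      · rw [if_pos hp, pvRt_of_root g i hp, if_neg (by omega : ¬ (i : Int) = (j : Int))]
      · rw [if_neg hp]
        obtain ⟨h0, h1⟩ := hP i hi
        have hlt : (g.getD i 0).toNat < i := by omega
        rw [IH _ hlt (by omega), pvRt_unfold g hP i hi, if_neg hp]

def pvNorm (L : Nat) (a : Int) : Nat := (if a < 0 then (L : Int) + a else a).toNat

theorem pvNorm_natCast (L : Nat) (i : Nat) : pvNorm L (i : Int) = i := by
  unfold pvNorm
  rw [if_neg (by omega)]
  omega

theorem pv_pyGet_inrange (xs : List Int) (a : Int) (h1 : -(xs.length : Int) ≤ a)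
    (h2 : a < xs.length) (d : Int) :
    (PySem.List.pyGet? xs a).getD d = xs.getD (pvNorm xs.length a) 0 := by
  have : PySem.List.pyGet? xs a = some (xs.getD (pvNorm xs.length a) 0) := by
    unfold pvNorm
    rcases lt_or_ge a 0 with h | h
    · have ha : a = -(((-a).toNat : Nat) : Int) := by omega
      have hk : 0 < (-a).toNat := by omega
      have hk2 : (-a).toNat ≤ xs.length := by omega
      rw [ha, PySem.List.pyGet?_neg_natCast _ _ hk hk2]
      rw [List.getD_eq_getElem?_getD]
      have heq : ((if -(((-a).toNat : Nat) : Int) < 0 then (xs.length : Int) + -(((-a).toNat : Nat) : Int) else -(((-a).toNat : Nat) : Int)).toNat) = xs.length - (-a).toNat := by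
        rw [if_pos (by omega)]; omega
      rw [heq]
      have hlt : xs.length - (-a).toNat < xs.length := by omega
      simp [hlt]
    · rw [PySem.List.pyGet?_of_nonneg xs h]
      have hlt : a.toNat < xs.length := by omega
      rw [if_neg (by omega : ¬ a < 0)]
      simp [List.getD_eq_getElem?_getD, hlt]
  rw [this, Option.getD_some]

theorem pv_pySetD_inrange (xs : List Int) (a : Int) (v : Int) (h1 : -(xs.length : Int) ≤ a)
    (h2 : a < (xs.length : Int)) :
    PySem.List.pySetD xs a v = xs.set (pvNorm xs.length a) v := by
  unfold PySem.List.pySetD PySem.List.pySet? PySem.List.pyIdx? pvNorm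
  rcases lt_or_ge a 0 with h | h
  · rw [if_neg (by omega), if_pos h1, if_pos h]
    simp only [Option.map_some, Option.getD_some]
    congr 1
    omega
  · rw [if_pos h, if_pos h2, if_neg (by omega)]
    simp only [Option.map_some, Option.getD_some]

theorem pvFindRoot_pos (i : Nat) :
    ∀ (g : List Int) (f : Nat), pvPInv g → i < g.length → i + 1 ≤ f →
    (pvFindRoot f g (i : Int)).2 = pvRt g i ∧
    (pvFindRoot f g (i : Int)).1.length = g.length ∧
    pvPInv (pvFindRoot f g (i : Int)).1 ∧
    ∀ k : Nat, k < g.length → pvRt (pvFindRoot f g (i : Int)).1 k = pvRt g k := by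
  induction i using Nat.strong_induction_on with
  | _ i IH =>
    intro g f hP hi hf
    obtain ⟨f', rfl⟩ : ∃ f', f = f' + 1 := ⟨f - 1, by omega⟩
    rw [pvFindRoot]
    simp only
    rw [pv_pyGet_inrange g (i : Int) (by omega) (by omega), pvNorm_natCast]
    by_cases hp : g.getD i 0 = (i : Int)
    · rw [if_pos hp]
      exact ⟨(pvRt_of_root g i hp).symm, rfl, hP, fun k _ => rfl⟩
    · rw [if_neg hp]
      obtain ⟨h0, h1⟩ := hP i hi
      have hlt : (g.getD i 0).toNat < i := by omega
      have hcast : ((((g.getD i 0).toNat) : Nat) : Int) = g.getD i 0 := by omega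
      have hrec := IH _ hlt g f' hP (by omega) (by omega)
      rw [hcast] at hrec
      obtain ⟨hr2, hrlen, hrP, hrrt⟩ := hrec
      set rec1 := pvFindRoot f' g (g.getD i 0) with hrec1
      have hset : PySem.List.pySetD rec1.1 (i : Int) rec1.2 = rec1.1.set i rec1.2 := by
        rw [pv_pySetD_inrange rec1.1 (i : Int) rec1.2 (by omega) (by omega), pvNorm_natCast]
      have hr2' : rec1.2 = pvRt rec1.1 i := by
        rw [hr2, hrrt i hi, pvRt_unfold g hP i hi, if_neg hp]
      have hbounds := pvRt_bounds rec1.1 hrP i (by omega)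
      constructor
      · simp only [hset]
        rw [pv_pyGet_inrange _ (i : Int) (by rw [List.length_set, hrlen]; omega) (by rw [List.length_set, hrlen]; omega), pvNorm_natCast,
          pv_getD_set rec1.1 i rec1.2 i (by omega)]
        rw [if_pos rfl, hr2, pvRt_unfold g hP i hi, if_neg hp]
      refine ⟨?_, ?_, ?_⟩
      · simp [hset, hrlen]
      · simp only [hset]
        rw [hr2']
        exact pvPInv_set rec1.1 i _ hbounds.1 hbounds.2 hrP
      · intro k hk
        simp only [hset]
        rw [hr2']
        rw [pvRt_set_compress rec1.1 hrP i (by omega) k (by omega)]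
        exact hrrt k hk

theorem pvFindRoot_spec (g : List Int) (hP : pvPInv g) (a : Int)
    (h1 : -(g.length : Int) ≤ a) (h2 : a < (g.length : Int)) (f : Nat)
    (hf : g.length + 1 ≤ f) :
    (pvFindRoot f g a).2 = pvRt g (pvNorm g.length a) ∧
    (pvFindRoot f g a).1.length = g.length ∧
    pvPInv (pvFindRoot f g a).1 ∧
    ∀ k : Nat, k < g.length → pvRt (pvFindRoot f g a).1 k = pvRt g k := by
  rcases lt_or_ge a 0 with hneg | hpos
  · -- negative index: one unfolding step lands on the normalised vertex
    obtain ⟨f', rfl⟩ : ∃ f', f = f' + 1 := ⟨f - 1, by omega⟩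
    set na := pvNorm g.length a with hna
    have hnaval : (na : Int) = (g.length : Int) + a := by
      rw [hna]; unfold pvNorm; rw [if_pos hneg]; omega
    have hnalt : na < g.length := by omega
    rw [pvFindRoot]
    simp only
    rw [pv_pyGet_inrange g a h1 h2, ← hna]
    obtain ⟨h0, hle⟩ := hP na hnalt
    rw [if_neg (by omega : ¬ g.getD na 0 = a)]
    have hlt : (g.getD na 0).toNat + 1 ≤ f' := by omega
    have hcast : ((((g.getD na 0).toNat) : Nat) : Int) = g.getD na 0 := by omega
    have hrec := pvFindRoot_pos (g.getD na 0).toNat g f' hP (by omega) hlt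
    rw [hcast] at hrec
    obtain ⟨hr2, hrlen, hrP, hrrt⟩ := hrec
    set rec1 := pvFindRoot f' g (g.getD na 0) with hrec1
    have hr2na : rec1.2 = pvRt g na := by
      rw [hr2, pvRt_unfold g hP na hnalt]
      by_cases hroot : g.getD na 0 = (na : Int)
      · rw [if_pos hroot, hroot, Int.toNat_natCast]
        exact pvRt_of_root g na hroot
      · rw [if_neg hroot]
    have hset : PySem.List.pySetD rec1.1 a rec1.2 = rec1.1.set na rec1.2 := by
      rw [pv_pySetD_inrange rec1.1 a rec1.2 (by rw [hrlen]; omega) (by rw [hrlen]; omega)]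
      congr 1
      unfold pvNorm
      rw [if_pos hneg, hrlen]
      omega
    have hr2' : rec1.2 = pvRt rec1.1 na := by rw [hr2na, hrrt na hnalt]
    have hbounds := pvRt_bounds rec1.1 hrP na (by omega)
    refine ⟨?_, ?_, ?_, ?_⟩
    · simp only [hset]
      rw [pv_pyGet_inrange _ a (by rw [List.length_set, hrlen]; omega) (by rw [List.length_set, hrlen]; omega)]
      have : pvNorm (rec1.1.set na rec1.2).length a = na := by
        unfold pvNorm
        rw [if_pos hneg, List.length_set, hrlen]
        omega
      rw [this, pv_getD_set rec1.1 na rec1.2 na (by omega), if_pos rfl, hr2na]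
    · simp [hset, hrlen]
    · simp only [hset]
      rw [hr2']
      exact pvPInv_set rec1.1 na _ hbounds.1 hbounds.2 hrP
    · intro k hk
      simp only [hset]
      rw [hr2', pvRt_set_compress rec1.1 hrP na (by omega) k (by omega)]
      exact hrrt k hk
  · have ha : a = ((a.toNat : Nat) : Int) := by omega
    rw [ha, pvNorm_natCast]
    exact pvFindRoot_pos a.toNat g f hP (by omega) (by omega)

def pvSim (g c : List Int) : Prop :=
  g.length = c.length ∧ pvPInv g ∧ ∀ i : Nat, i < g.length → c.getD i 0 = pvRt g i

theorem pv_getD_map_ite (c : List Int) (lo hi : Int) (i : Nat) (hi' : i < c.length) :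
    (c.map (fun x => if x = hi then lo else x)).getD i 0
      = if c.getD i 0 = hi then lo else c.getD i 0 := by
  rw [List.getD_eq_getElem?_getD, List.getD_eq_getElem?_getD, List.getElem?_map]
  simp [hi']

theorem pvLoop_eq (es : List (Int × Int × Int)) :
    ∀ (g c : List Int) (s m cnt n1 : Int), pvSim g c →
    (∀ e ∈ es, -(g.length : Int) ≤ e.2.1 ∧ e.2.1 < (g.length : Int) ∧
               -(g.length : Int) ≤ e.2.2 ∧ e.2.2 < (g.length : Int)) →
    pvKruskalLoop n1 g s m cnt es = pvLabelLoop (n1 + 1) c s m cnt es := by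
  induction es with
  | nil => intro g c s m cnt n1 _ _; rfl
  | cons e rest IH =>
    obtain ⟨cost, a, b⟩ := e
    intro g c s m cnt n1 hsim hbnd
    obtain ⟨hlen, hP, hlab⟩ := hsim
    have hmem := hbnd (cost, a, b) List.mem_cons_self
    simp only at hmem
    obtain ⟨ha1, ha2, hb1, hb2⟩ := hmem
    rw [pvKruskalLoop, pvLabelLoop]
    simp only
    -- A's two find_root calls
    obtain ⟨h12, h1len, h1P, h1rt⟩ :=
      pvFindRoot_spec g hP a ha1 ha2 (g.length + 1) (by omega)
    set r1 := pvFindRoot (g.length + 1) g a with hr1def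
    obtain ⟨h22, h2len, h2P, h2rt⟩ :=
      pvFindRoot_spec r1.1 h1P b (by rw [h1len]; omega) (by rw [h1len]; omega)
        (r1.1.length + 1) (by omega)
    set r2 := pvFindRoot (r1.1.length + 1) r1.1 b with hr2def
    set na := pvNorm g.length a with hna
    set nb := pvNorm g.length b with hnb
    have hnalt : na < g.length := by
      rw [hna]; unfold pvNorm; split <;> omega
    have hnblt : nb < g.length := by
      rw [hnb]; unfold pvNorm; split <;> omega
    have h12' : r1.2 = pvRt g na := h12
    have h22' : r2.2 = pvRt g nb := by
      rw [h22, h1len, ← hnb]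
      exact h1rt nb hnblt
    -- B's two lookups
    have hclen : c.length = g.length := hlen.symm
    have hra : (PySem.List.pyGet? c a).getD a = pvRt g na := by
      rw [pv_pyGet_inrange c a (by omega) (by omega), hclen, ← hna]
      exact hlab na hnalt
    have hrb : (PySem.List.pyGet? c b).getD b = pvRt g nb := by
      rw [pv_pyGet_inrange c b (by omega) (by omega), hclen, ← hnb]
      exact hlab nb hnblt
    rw [hra, hrb, h12', h22']
    by_cases heq : pvRt g na = pvRt g nb
    · rw [if_pos heq, if_pos heq]
      have hrest : pvKruskalLoop n1 r2.1 s m cnt rest = pvLabelLoop (n1 + 1) c s m cnt rest := by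
        apply IH
        · refine ⟨by omega, h2P, ?_⟩
          intro i hi
          rw [h2rt i (by omega), h1rt i (by omega)]
          exact hlab i (by omega)
        · intro e he
          have := hbnd e (List.mem_cons_of_mem _ he)
          rw [h2len, h1len]
          exact this
      exact hrest
    · rw [if_neg heq, if_neg heq]
      by_cases hcnt : cnt + 1 = n1
      · rw [if_pos hcnt, if_pos (by omega : cnt + 1 = n1 + 1 - 1)]
      · rw [if_neg hcnt, if_neg (by omega : ¬ cnt + 1 = n1 + 1 - 1)]
        -- merged states still simulate each other
        set ra := pvRt g na with hradef
        set rb := pvRt g nb with hrbdef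
        set lo := if ra < rb then ra else rb with hlo
        set hi := if ra < rb then rb else ra with hhi
        have hra_b := pvRt_bounds g hP na hnalt
        have hrb_b := pvRt_bounds g hP nb hnblt
        have hlo0 : 0 ≤ lo := by rw [hlo]; split <;> omega
        have hhilt : hi < (g.length : Int) := by rw [hhi]; split <;> omega
        have hhi0 : 0 ≤ hi := by rw [hhi]; split <;> omega
        have hlohi : lo < hi := by
          rw [hlo, hhi]
          rcases lt_trichotomy ra rb with h | h | h
          · rw [if_pos h, if_pos h]; exact h
          · exact absurd h heq
          · rw [if_neg (by omega), if_neg (by omega)]; exact h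
        -- roots inside r2.1
        have hroot_ra : r2.1.getD ra.toNat 0 = ra := by
          have h := pvRt_isRoot r2.1 h2P na (by omega)
          rw [h2rt na (by omega), h1rt na hnalt, ← hradef] at h
          exact h
        have hroot_rb : r2.1.getD rb.toNat 0 = rb := by
          have h := pvRt_isRoot r2.1 h2P nb (by omega)
          rw [h2rt nb (by omega), h1rt nb hnblt, ← hrbdef] at h
          exact h
        have hroot_hi : r2.1.getD hi.toNat 0 = hi := by
          rw [hhi]; split
          · exact hroot_rb
          · exact hroot_ra
        have hroot_lo : r2.1.getD lo.toNat 0 = lo := by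
          rw [hlo]; split
          · exact hroot_ra
          · exact hroot_rb
        have hg3 : pvUnion r2.1 ra rb = r2.1.set hi.toNat lo := by
          unfold pvUnion
          rw [hlo, hhi]
          split
          · rw [pv_pySetD_inrange r2.1 rb ra (by omega) (by omega)]
            congr 1
            unfold pvNorm
            rw [if_neg (by omega)]
          · rw [pv_pySetD_inrange r2.1 ra rb (by omega) (by omega)]
            congr 1
            unfold pvNorm
            rw [if_neg (by omega)]
        have hsetu := pvRt_set_union r2.1 h2P hi.toNat (by omega)
          (by rw [hroot_hi]; omega) lo hlo0 (by omega) hroot_lo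
        apply IH
        · refine ⟨?_, ?_, ?_⟩
          · rw [hg3]
            simp [h2len, h1len, hlen]
          · rw [hg3]
            exact pvPInv_set r2.1 hi.toNat lo hlo0 (by omega) h2P
          · intro i hig3
            have hig : i < g.length := by
              rw [hg3, List.length_set] at hig3
              omega
            rw [hg3, hsetu i (by omega), pv_getD_map_ite c lo hi i (by omega),
              hlab i hig, h2rt i (by omega), h1rt i hig]
            have hcast : ((hi.toNat : Nat) : Int) = hi := by omega
            rw [hcast]
        · intro e he
          have := hbnd e (List.mem_cons_of_mem _ he)
          rw [hg3, List.length_set, h2len, h1len]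
          exact this

theorem pv_top (n : Int) (edge : List (Int × Int × Int))
    (hpre : ∀ e ∈ edge, -(n + 1) ≤ e.2.1 ∧ e.2.1 ≤ n ∧ -(n + 1) ≤ e.2.2 ∧ e.2.2 ≤ n) :
    pvKruskalLoop (n - 1) (PySem.List.pyRange 0 (n + 1) 1) 0 0 0
      (PySem.List.sorted edge (fun x => x.1))
    = pvLabelLoop n (PySem.List.pyRange 0 (n + 1) 1) 0 0 0
      (PySem.List.sorted edge (fun e => e.1)) := by
  by_cases hn : 0 ≤ n
  · set g0 := PySem.List.pyRange 0 (n + 1) 1 with hg0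
    have hlen0 : (g0.length : Int) = n + 1 := by
      rw [hg0, PySem.List.length_pyRange_one]; omega
    have hself : ∀ i : Nat, i < g0.length → g0.getD i 0 = (i : Int) := by
      intro i hi
      rw [List.getD_eq_getElem?_getD, List.getElem?_eq_getElem hi, Option.getD_some]
      simp only [hg0]
      rw [PySem.List.getElem_pyRange_one]
      omega
    have hP0 : pvPInv g0 := by
      intro i hi
      rw [hself i hi]
      omega
    have hsim : pvSim g0 g0 := by
      refine ⟨rfl, hP0, ?_⟩
      intro i hi
      rw [hself i hi, pvRt_of_root g0 i (hself i hi)]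
    have hres := pvLoop_eq (PySem.List.sorted edge (fun x => x.1)) g0 g0 0 0 0 (n - 1) hsim ?_
    · have hn1 : n - 1 + 1 = n := by omega
      rw [hn1] at hres
      exact hres
    · intro e he
      have he' : e ∈ edge := (PySem.List.mem_sorted _ _ _ _).1 he
      have := hpre e he'
      omega
  · have hedge : edge = [] := by
      cases edge with
      | nil => rfl
      | cons e es =>
        obtain ⟨h1, h2, _⟩ := hpre e List.mem_cons_self
        omega
    subst hedge
    have hnil : PySem.List.sorted ([] : List (Int × Int × Int)) (fun x : Int × Int × Int => x.1) = [] :=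
      List.Perm.eq_nil (PySem.List.sorted_perm _ _ _)
    rw [hnil]
    rfl

-- ===== VERDICT (by name: the statement is the Claim_ definition above) =====
theorem solution_spec : Claim_equal_solution := by
  intro n edge _ hpre
  show solution n edge = solution_alt n edge
  unfold solution solution_alt
  exact pv_top n edge hpre
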